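-- pv_equiv track=rewrite | github.com/AlexPerez31/CriptoTaller7 | Deffie-Hellman.py | R_primitiva
-- ===== SOURCE A (Python) =====
-- def es_primo(n):
--     if n <= 1:
--         return False
--     if n <= 3:
--         return True
--     if n % 2 == 0 or n % 3 == 0:
--         return False
--     i = 5
--     while i * i <= n:
--         if n % i == 0 or n % (i + 2) == 0:
--             return False
--         i += 6
--     return True
--
-- def R_primitiva(q):
--     raices_primitvas = []
--     for i in range(2, q):
--         if es_primo(i) and pow(i, (q-1)//2, q) != 1:
--             raices_primitvas.append(i)
--             if len(raices_primitvas) == 10: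
--                 break
--
--     return raices_primitvas
-- ===== SOURCE B (Python) =====
-- def R_primitiva(q):
--     # Incremental sieve: maintain the ascending list of all primes found so far
--     # and test each candidate by dividing only by stored primes up to sqrt(n).
--     out = []
--     primes = []
--     e = (q - 1) // 2
--     n = 2
--     while n < q and len(out) < 10:
--         is_p = True
--         for p in primes:
--             if p * p > n:
--                 break
--             if n % p == 0:
--                 is_p = False
--                 break
--         if is_p:
--             primes.append(n)
--             if pow(n, e, q) != 1:
--                 out.append(n)
--         n += 1
--     return out
-- ===== Notes on version B (the rewrite author's own statement) =====
-- stated objective: alternative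
-- what changed: Replaces per-candidate wheel trial division (es_primo) with an incremental sieve that maintains the list of primes found so far and tests each candidate only against stored primes up to its square root, and restructures the for/break loop as a while loop guarded by the output count.
import Mathlib
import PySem

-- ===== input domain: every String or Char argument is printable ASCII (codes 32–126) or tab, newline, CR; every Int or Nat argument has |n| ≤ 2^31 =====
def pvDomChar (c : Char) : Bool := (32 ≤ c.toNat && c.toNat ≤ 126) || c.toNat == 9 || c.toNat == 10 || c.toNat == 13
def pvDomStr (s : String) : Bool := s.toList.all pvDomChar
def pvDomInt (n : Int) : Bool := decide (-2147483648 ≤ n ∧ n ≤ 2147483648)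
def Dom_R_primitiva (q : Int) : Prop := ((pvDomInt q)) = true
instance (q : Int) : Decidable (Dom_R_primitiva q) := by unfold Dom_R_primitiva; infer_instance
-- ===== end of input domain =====

-- B replaces A's per-candidate wheel trial division with an incremental sieve that keeps
-- the list of primes found so far (objective: alternative structure, similar cost).

-- shared helper: Python's built-in three-argument pow(b, e, m), by the binary method
-- (exact for m > 0, the only way both loops call it; PySem.Int.powMod is linear in e and
-- cannot be evaluated at e ~ 2^30)
def powMod2 (b : Int) (e : Nat) (m : Int) : Int :=
  if e = 0 then PySem.Int.mod 1 m
  else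
    let h := powMod2 b (e / 2) m
    let h2 := PySem.Int.mod (h * h) m
    if e % 2 = 1 then PySem.Int.mod (h2 * b) m else h2

-- ===== PORT A =====
-- while i*i <= n: check n % i, n % (i+2); i += 6
def esPrimoAux (n i : Int) : Bool :=
  if h : i * i ≤ n then
    if PySem.Int.mod n i == 0 || PySem.Int.mod n (i + 2) == 0 then false
    else esPrimoAux n (i + 6)
  else true
termination_by (n + 1 - i).toNat
decreasing_by
  have hin : i ≤ n := by nlinarith [mul_self_nonneg (i - 1)]
  omega

def esPrimo (n : Int) : Bool :=
  if n ≤ 1 then false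
  else if n ≤ 3 then true
  else if PySem.Int.mod n 2 == 0 || PySem.Int.mod n 3 == 0 then false
  else esPrimoAux n 5

-- for i in range(2, q): … append; break once 10 are collected (index recursion: the
-- range is consumed lazily, never materialized).
-- pow(i, (q-1)//2, q): the loop only runs for 2 ≤ i < q, so (q-1)//2 ≥ 1 and .toNat is exact.
def rPrimLoop (q : Int) (i : Int) (acc : List Int) : List Int :=
  if h : i < q then
    if esPrimo i && (powMod2 i (PySem.Int.floordiv (q - 1) 2).toNat q != 1) then
      let acc' := acc ++ [i]
      if acc'.length == 10 then acc' else rPrimLoop q (i + 1) acc'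
    else rPrimLoop q (i + 1) acc
  else acc
termination_by (q - i).toNat
decreasing_by all_goals omega

def R_primitiva (q : Int) : List Int :=
  rPrimLoop q 2 []

-- ===== PORT B =====
-- for p in primes: break at p*p > n; composite when n % p == 0
def isPrimeWith (n : Int) : List Int → Bool
  | [] => true
  | p :: ps =>
    if p * p > n then true
    else if PySem.Int.mod n p == 0 then false
    else isPrimeWith n ps

-- while n < q and len(out) < 10: …  (e = (q-1)//2, ≥ 1 whenever the guard holds, so .toNat is exact)
def altLoop (q : Int) (e : Nat) (n : Int) (primes out : List Int) : List Int :=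
  if h : n < q ∧ out.length < 10 then
    if isPrimeWith n primes then
      if powMod2 n e q != 1 then
        altLoop q e (n + 1) (primes ++ [n]) (out ++ [n])
      else
        altLoop q e (n + 1) (primes ++ [n]) out
    else altLoop q e (n + 1) primes out
  else out
termination_by (q - n).toNat
decreasing_by all_goals omega

def R_primitiva_alt (q : Int) : List Int :=
  altLoop q (PySem.Int.floordiv (q - 1) 2).toNat 2 [] []

-- ===== PRECONDITION & SPEC =====
def Spec_R_primitiva (q : Int) (out : List Int) : Prop := out = R_primitiva_alt q
instance (q : Int) (out : List Int) : Decidable (Spec_R_primitiva q out) := by unfold Spec_R_primitiva; infer_instance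

-- ===== CLAIM (what is proved, stated in full; the proofs are below) =====
def Claim_equal_R_primitiva : Prop := ∀ (q : Int), Dom_R_primitiva q → Spec_R_primitiva q (R_primitiva q)

-- ===== LEMMAS AND PROOFS =====

-- the divisor-free characterization on [2, ∞) that both primality tests decide
def NoSmallDiv (n : Int) : Prop := ∀ d : Int, 2 ≤ d → d * d ≤ n → ¬ d ∣ n

theorem esPrimoAux_correct (n : Int) (h2 : ¬ (2:Int) ∣ n) (h3 : ¬ (3:Int) ∣ n) :
    ∀ i : Int, 5 ≤ i → i % 6 = 5 →
    (esPrimoAux n i = true ↔ ∀ d : Int, i ≤ d → d * d ≤ n → ¬ d ∣ n) := by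
  intro i
  induction i using esPrimoAux.induct (n := n) with
  | case1 i hle hhit =>
    intro hi _
    rw [esPrimoAux]
    simp only [dif_pos hle, if_pos hhit]
    refine iff_of_false (by simp) fun H => ?_
    simp only [Bool.or_eq_true, beq_iff_eq, PySem.Int.mod_eq_zero_iff_dvd] at hhit
    rcases hhit with hd | hd
    · exact H i (le_refl i) hle hd
    · by_cases hsq : (i + 2) * (i + 2) ≤ n
      · exact H (i + 2) (by omega) hsq hd
      · obtain ⟨k, hk⟩ := hd
        have hklo : i - 1 ≤ k := by nlinarith
        have hkhi : k ≤ i + 1 := by nlinarith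
        have hk3 : k = i - 1 ∨ k = i ∨ k = i + 1 := by omega
        rcases hk3 with hk' | hk' | hk'
        · apply h2
          have h2k : (2:Int) ∣ k := by omega
          exact hk ▸ Dvd.dvd.mul_left h2k (i + 2)
        · exact H i (le_refl i) hle ⟨i + 2, by rw [hk, hk']; ring⟩
        · apply h2
          have h2k : (2:Int) ∣ k := by omega
          exact hk ▸ Dvd.dvd.mul_left h2k (i + 2)
  | case2 i hle hhit ih =>
    intro hi hm
    rw [esPrimoAux]
    simp only [dif_pos hle, if_neg hhit]
    rw [ih (by omega) (by omega)]
    simp only [Bool.or_eq_true, beq_iff_eq, PySem.Int.mod_eq_zero_iff_dvd, not_or] at hhit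
    constructor
    · intro H d hd hdd hdvd
      by_cases hd6 : i + 6 ≤ d
      · exact H d hd6 hdd hdvd
      · have hcase : d = i ∨ d = i + 1 ∨ d = i + 2 ∨ d = i + 3 ∨ d = i + 4 ∨ d = i + 5 := by omega
        rcases hcase with h' | h' | h' | h' | h' | h'
        · exact hhit.1 (h' ▸ hdvd)
        · exact h2 (dvd_trans (by omega : (2:Int) ∣ d) hdvd)
        · exact hhit.2 (h' ▸ hdvd)
        · exact h2 (dvd_trans (by omega : (2:Int) ∣ d) hdvd)
        · exact h3 (dvd_trans (by omega : (3:Int) ∣ d) hdvd)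
        · exact h2 (dvd_trans (by omega : (2:Int) ∣ d) hdvd)
    · intro H d hd hdd hdvd
      exact H d (by omega) hdd hdvd
  | case3 i hle =>
    intro hi _
    rw [esPrimoAux]
    simp only [dif_neg hle, true_iff]
    intro d hd hdd _
    have hlt : n < i * i := lt_of_not_ge hle
    nlinarith

theorem esPrimo_correct (n : Int) (hn : 2 ≤ n) :
    esPrimo n = true ↔ NoSmallDiv n := by
  unfold esPrimo NoSmallDiv
  rw [if_neg (by omega : ¬ n ≤ 1)]
  by_cases h3 : n ≤ 3
  · rw [if_pos h3]
    simp only [true_iff]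
    intro d hd hdd hdvd; nlinarith
  · rw [if_neg h3]
    by_cases hdiv : PySem.Int.mod n 2 = 0 ∨ PySem.Int.mod n 3 = 0
    · rw [if_pos (by simpa using hdiv)]
      refine iff_of_false (by simp) fun H => ?_
      rcases hdiv with h | h
      · exact H 2 (by omega) (by omega) ((PySem.Int.mod_eq_zero_iff_dvd n 2).mp h)
      · have hd : (3:Int) ∣ n := (PySem.Int.mod_eq_zero_iff_dvd n 3).mp h
        by_cases he : (2:Int) ∣ n
        · exact H 2 (by omega) (by omega) he
        · exact H 3 (by omega) (by omega) hd
    · rw [if_neg (by simpa using hdiv)]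
      rw [not_or] at hdiv
      have h2 : ¬ (2:Int) ∣ n := fun h => hdiv.1 ((PySem.Int.mod_eq_zero_iff_dvd n 2).mpr h)
      have h3' : ¬ (3:Int) ∣ n := fun h => hdiv.2 ((PySem.Int.mod_eq_zero_iff_dvd n 3).mpr h)
      rw [esPrimoAux_correct n h2 h3' 5 (by omega) (by omega)]
      constructor
      · intro H d hd hdd hdvd
        by_cases h5 : 5 ≤ d
        · exact H d h5 hdd hdvd
        · have : d = 2 ∨ d = 3 ∨ d = 4 := by omega
          rcases this with h' | h' | h'
          · exact h2 (h' ▸ hdvd)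
          · exact h3' (h' ▸ hdvd)
          · exact h2 (dvd_trans (by omega : (2:Int) ∣ d) hdvd)
      · intro H d hd hdd hdvd
        exact H d (by omega) hdd hdvd

theorem isPrimeWith_spec (n : Int) :
    ∀ l : List Int, (∀ p ∈ l, 2 ≤ p) → l.Pairwise (· ≤ ·) →
    (isPrimeWith n l = true ↔ ∀ p ∈ l, p * p ≤ n → ¬ p ∣ n) := by
  intro l
  induction l with
  | nil => intro _ _; simp [isPrimeWith]
  | cons p ps ih =>
    intro hge hpair
    rw [List.pairwise_cons] at hpair
    rw [isPrimeWith]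
    by_cases h1 : p * p > n
    · rw [if_pos h1]
      simp only [true_iff]
      intro x hx hxx hxdvd
      rcases List.mem_cons.mp hx with h' | h'
      · rw [h'] at hxx; omega
      · have hple := hpair.1 x h'
        have hp2 := hge p (List.mem_cons_self ..)
        nlinarith
    · rw [if_neg h1]
      by_cases h2 : PySem.Int.mod n p = 0
      · rw [if_pos (by simpa using h2)]
        refine iff_of_false (by simp) fun H => ?_
        exact H p (List.mem_cons_self ..) (by omega) ((PySem.Int.mod_eq_zero_iff_dvd n p).mp h2)
      · rw [if_neg (by simpa using h2)]
        rw [ih (fun x hx => hge x (List.mem_cons_of_mem p hx)) hpair.2]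
        constructor
        · intro H x hx hxx hxdvd
          rcases List.mem_cons.mp hx with h' | h'
          · exact h2 ((PySem.Int.mod_eq_zero_iff_dvd n p).mpr (h' ▸ hxdvd))
          · exact H x h' hxx hxdvd
        · intro H x hx hxx hxdvd
          exact H x (List.mem_cons_of_mem p hx) hxx hxdvd

def primesBelow (n : Int) : List Int :=
  (PySem.List.pyRange 2 n 1).filter (fun i => esPrimo i)

theorem mem_primesBelow {n p : Int} (h : p ∈ primesBelow n) :
    2 ≤ p ∧ p < n ∧ esPrimo p = true := by
  unfold primesBelow at h
  rw [List.mem_filter, PySem.List.mem_pyRange_one] at h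
  exact ⟨h.1.1, h.1.2, h.2⟩

theorem isPrimeWith_primesBelow (n : Int) (hn : 2 ≤ n) :
    isPrimeWith n (primesBelow n) = esPrimo n := by
  have hge : ∀ p ∈ primesBelow n, 2 ≤ p := fun p hp => (mem_primesBelow hp).1
  have hpair : (primesBelow n).Pairwise (· ≤ ·) := by
    unfold primesBelow
    exact ((PySem.List.pairwise_lt_pyRange_one 2 n).imp le_of_lt).filter _
  have h1 := isPrimeWith_spec n (primesBelow n) hge hpair
  have h2 := esPrimo_correct n hn
  have key : (∀ p ∈ primesBelow n, p * p ≤ n → ¬ p ∣ n) ↔ NoSmallDiv n := by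
    constructor
    · intro H d hd2 hdd hdvd
      -- pass to the least prime factor of d
      have hd0 : (0:Int) ≤ d := by omega
      have hdn2 : 2 ≤ d.toNat := by omega
      set m0 := d.toNat.minFac with hm0
      have hprime : m0.Prime := Nat.minFac_prime (by omega)
      have hmd : (m0 : Int) ∣ d := by
        have := Nat.minFac_dvd d.toNat
        have h' := Int.natCast_dvd_natCast.mpr this
        rwa [Int.toNat_of_nonneg hd0] at h'
      have hm2 : (2:Int) ≤ (m0 : Int) := by exact_mod_cast hprime.two_le
      have hmled : (m0 : Int) ≤ d := by
        have := Nat.minFac_le (by omega : 0 < d.toNat)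
        omega
      have hmm : (m0 : Int) * m0 ≤ n := by nlinarith
      have hmn : (m0 : Int) ∣ n := dvd_trans hmd hdvd
      have hdltn : d < n := by nlinarith
      have hmem : (m0 : Int) ∈ primesBelow n := by
        unfold primesBelow
        rw [List.mem_filter, PySem.List.mem_pyRange_one]
        refine ⟨⟨hm2, by omega⟩, ?_⟩
        rw [esPrimo_correct _ hm2]
        intro e he2 hee hedvd
        have he0 : (0:Int) ≤ e := by omega
        have hetn : e.toNat ∣ m0 := by
          have h' : (e.toNat : Int) ∣ (m0 : Int) := by
            rwa [Int.toNat_of_nonneg he0]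
          exact_mod_cast h'
        rcases (Nat.Prime.eq_one_or_self_of_dvd hprime e.toNat hetn) with h' | h'
        · omega
        · have : e = (m0 : Int) := by omega
          nlinarith [this ▸ hee]
      exact H _ hmem hmm hmn
    · intro H p hp hpp hpdvd
      exact H p (mem_primesBelow hp).1 hpp hpdvd
  have : isPrimeWith n (primesBelow n) = true ↔ esPrimo n = true := by
    rw [h1, h2]; exact key
  cases hA : isPrimeWith n (primesBelow n) <;> cases hB : esPrimo n <;> simp_all

theorem primesBelow_succ (n : Int) (hn : 2 ≤ n) :
    primesBelow (n + 1) = primesBelow n ++ (if esPrimo n then [n] else []) := by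
  unfold primesBelow
  rw [PySem.List.pyRange_one_succ_right (by omega : (2:Int) ≤ n), List.filter_append]
  simp [List.filter]
  split <;> simp_all

theorem loop_eq (q : Int) :
    ∀ (k : Nat) (n : Int) (out : List Int), (q - n).toNat ≤ k → 2 ≤ n → out.length < 10 →
    rPrimLoop q n out
      = altLoop q (PySem.Int.floordiv (q - 1) 2).toNat n (primesBelow n) out := by
  intro k
  induction k with
  | zero =>
    intro n out hk h2n hlen
    rw [rPrimLoop, altLoop, dif_neg (by omega), dif_neg (by omega)]
  | succ k ih =>
    intro n out hk h2n hlen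
    by_cases hq : n < q
    · rw [rPrimLoop, altLoop, dif_pos hq, dif_pos ⟨hq, hlen⟩,
        isPrimeWith_primesBelow n h2n]
      by_cases hp : esPrimo n
      · rw [if_pos hp, hp, Bool.true_and]
        have hpb := primesBelow_succ n h2n
        rw [if_pos hp] at hpb
        by_cases hb : (powMod2 n (PySem.Int.floordiv (q - 1) 2).toNat q != 1) = true
        · rw [if_pos hb, if_pos hb]
          by_cases h10 : (out ++ [n]).length = 10
          · rw [if_pos (by simpa using h10), altLoop,
              dif_neg (fun hcontra => by omega)]
          · rw [if_neg (by simpa using h10)]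
            have hlen' : (out ++ [n]).length < 10 := by
              rw [List.length_append]; simp only [List.length_cons, List.length_nil]
              rw [List.length_append] at h10; simp only [List.length_cons, List.length_nil] at h10
              omega
            rw [ih (n + 1) (out ++ [n]) (by omega) (by omega) hlen', hpb]
        · rw [if_neg hb, if_neg hb, ih (n + 1) out (by omega) (by omega) hlen, hpb]
      · rw [if_neg hp]
        have heq : esPrimo n = false := by simpa using hp
        rw [heq, Bool.false_and, if_neg (by simp)]
        have hpb := primesBelow_succ n h2n
        rw [if_neg hp] at hpb
        rw [ih (n + 1) out (by omega) (by omega) hlen, hpb, List.append_nil]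
    · rw [rPrimLoop, altLoop, dif_neg (by omega), dif_neg (by omega)]

-- ===== VERDICT (by name: the statement is the Claim_ definition above) =====
theorem R_primitiva_spec : Claim_equal_R_primitiva := by
  intro q _
  unfold Spec_R_primitiva R_primitiva R_primitiva_alt
  have h := loop_eq q (q - 2).toNat 2 [] (by omega) (by norm_num) (by norm_num)
  have hpb : primesBelow 2 = [] := by
    unfold primesBelow
    rw [PySem.List.pyRange_one_eq_nil (by omega : (2:Int) ≤ 2)]
    rfl
  rw [h, hpb]
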